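-- pv_equiv track=rewrite | github.com/ghostofpokemon/DeepDream-MLX | train_dream.py | aux_prefixes
-- ===== SOURCE A (Python) =====
-- from typing import Dict, Iterable, List, Optional, Tuple
--
-- def aux_prefixes(idx: int, target: str) -> List[str]:
--     mapping = {
--         "loss_conv": ["aux{idx}.proj"],
--         "loss_fc": ["aux{idx}.proj", "aux{idx}.fc1"],
--         "loss_classifier": ["aux{idx}.proj", "aux{idx}.fc1", "aux{idx}.fc2"],
--     }
--     order = ["loss_conv", "loss_fc", "loss_classifier"]
--     prefixes: List[str] = []
--     for name in order:
--         for p in mapping[name]: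
--             prefix = p.format(idx=idx)
--             if prefix not in prefixes:
--                 prefixes.append(prefix)
--         if name == target:
--             break
--     return prefixes
-- ===== SOURCE B (Python) =====
-- from typing import List
--
-- def aux_prefixes(idx: int, target: str) -> List[str]:
--     mapping = {
--         "loss_conv": ["aux{idx}.proj"],
--         "loss_fc": ["aux{idx}.proj", "aux{idx}.fc1"],
--         "loss_classifier": ["aux{idx}.proj", "aux{idx}.fc1", "aux{idx}.fc2"],
--     }
--     return [p.format(idx=idx) for p in mapping.get(target, mapping["loss_classifier"])]
-- ===== Notes on version B (the rewrite author's own statement) =====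
-- stated objective: simpler
-- what changed: Replaces the ordered loop-with-break and membership dedup by a single direct dict lookup of the cumulative list for target (defaulting to the full loss_classifier list) formatted in one comprehension.
import Mathlib
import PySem

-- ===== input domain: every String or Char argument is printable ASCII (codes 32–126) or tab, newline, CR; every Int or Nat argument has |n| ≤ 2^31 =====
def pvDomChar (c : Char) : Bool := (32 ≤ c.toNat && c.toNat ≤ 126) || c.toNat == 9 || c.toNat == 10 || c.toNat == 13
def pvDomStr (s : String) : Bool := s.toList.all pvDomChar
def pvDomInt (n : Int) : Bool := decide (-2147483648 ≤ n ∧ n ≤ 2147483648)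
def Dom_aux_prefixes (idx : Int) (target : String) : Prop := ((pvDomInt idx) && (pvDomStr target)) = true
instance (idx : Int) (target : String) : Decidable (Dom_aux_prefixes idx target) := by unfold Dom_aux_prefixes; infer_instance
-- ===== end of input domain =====

-- B replaces A's ordered loop-with-break and membership dedup by a direct lookup of the
-- cumulative list for target (defaulting to the full loss_classifier list); objective: simpler.

-- p.format(idx=idx) for these single-placeholder templates, ported exactly as
-- substitution of "{idx}" by str(idx) (PySem.Str.replace is exact).
def pyFormatIdx (p : String) (idx : Int) : String :=
  PySem.Str.replace p "{idx}" (PySem.Int.toStr idx)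

-- the mapping dict both Pythons build
def auxMapping : PySem.Dict String (List String) :=
  PySem.Dict.ofList [("loss_conv", ["aux{idx}.proj"]),
   ("loss_fc", ["aux{idx}.proj", "aux{idx}.fc1"]),
   ("loss_classifier", ["aux{idx}.proj", "aux{idx}.fc1", "aux{idx}.fc2"])]

-- ===== PORT A =====
-- the 'for name in order' loop with its break, as structural recursion on order
def auxLoopA (idx : Int) (target : String) : List String → List String → List String
  | [], prefixes => prefixes
  | name :: rest, prefixes =>
    let prefixes :=
      (PySem.Dict.getD auxMapping name []).foldl
        (fun acc p =>
          let pfx := pyFormatIdx p idx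
          if pfx ∈ acc then acc else acc ++ [pfx]) prefixes
    if name == target then prefixes else auxLoopA idx target rest prefixes

def aux_prefixes (idx : Int) (target : String) : List String :=
  auxLoopA idx target ["loss_conv", "loss_fc", "loss_classifier"] []

-- ===== PORT B =====
def aux_prefixes_alt (idx : Int) (target : String) : List String :=
  (PySem.Dict.getD auxMapping target
      (PySem.Dict.getD auxMapping "loss_classifier" [])).map (fun p => pyFormatIdx p idx)

-- ===== PRECONDITION & SPEC =====
def Spec_aux_prefixes (idx : Int) (target : String) (out : List String) : Prop := out = aux_prefixes_alt idx target
instance (idx : Int) (target : String) (out : List String) : Decidable (Spec_aux_prefixes idx target out) := by unfold Spec_aux_prefixes; infer_instance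

-- ===== CLAIM (what is proved, stated in full; the proofs are below) =====
def Claim_equal_aux_prefixes : Prop := ∀ (idx : Int) (target : String), Dom_aux_prefixes idx target → Spec_aux_prefixes idx target (aux_prefixes idx target)

-- ===== LEMMAS AND PROOFS =====

theorem auxMapping_eq : auxMapping = PySem.Dict.mk
    [("loss_conv", ["aux{idx}.proj"]),
     ("loss_fc", ["aux{idx}.proj", "aux{idx}.fc1"]),
     ("loss_classifier", ["aux{idx}.proj", "aux{idx}.fc1", "aux{idx}.fc2"])] := by decide

-- formatting the three templates
theorem fmt_proj (idx : Int) : pyFormatIdx "aux{idx}.proj" idx = "aux" ++ PySem.Int.toStr idx ++ ".proj" := by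
  simp [pyFormatIdx, PySem.Str.replace, PySem.Chars.replace, PySem.Chars.replace.go,
        String.ext_iff, String.toList_append]

theorem fmt_fc1 (idx : Int) : pyFormatIdx "aux{idx}.fc1" idx = "aux" ++ PySem.Int.toStr idx ++ ".fc1" := by
  simp [pyFormatIdx, PySem.Str.replace, PySem.Chars.replace, PySem.Chars.replace.go,
        String.ext_iff, String.toList_append]

theorem fmt_fc2 (idx : Int) : pyFormatIdx "aux{idx}.fc2" idx = "aux" ++ PySem.Int.toStr idx ++ ".fc2" := by
  simp [pyFormatIdx, PySem.Str.replace, PySem.Chars.replace, PySem.Chars.replace.go,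
        String.ext_iff, String.toList_append]

-- distinct literal suffixes after a common prefix give distinct strings
theorem app_ne (s x y : String) (h : x ≠ y) : ("aux" ++ s ++ x) ≠ ("aux" ++ s ++ y) := by
  intro he
  apply h
  have : ("aux" ++ s ++ x).toList = ("aux" ++ s ++ y).toList := by rw [he]
  simp only [String.toList_append, List.append_assoc, List.append_cancel_left_eq] at this
  exact String.toList_injective this

theorem aux_prefixes_spec' (idx : Int) (target : String) :
    aux_prefixes idx target = aux_prefixes_alt idx target := by
  by_cases h1 : target = "loss_conv"
  · subst h1
    simp [aux_prefixes, aux_prefixes_alt, auxLoopA, auxMapping_eq, PySem.Dict.getD,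
          PySem.Dict.get?_mk_cons, List.foldl, fmt_proj]
  by_cases h2 : target = "loss_fc"
  · subst h2
    simp [aux_prefixes, aux_prefixes_alt, auxLoopA, auxMapping_eq, PySem.Dict.getD,
          PySem.Dict.get?_mk_cons, List.foldl, fmt_proj, fmt_fc1,
          app_ne (PySem.Int.toStr idx) ".fc1" ".proj" (by decide)]
  by_cases h3 : target = "loss_classifier"
  · subst h3
    simp [aux_prefixes, aux_prefixes_alt, auxLoopA, auxMapping_eq, PySem.Dict.getD,
          PySem.Dict.get?_mk_cons, List.foldl, fmt_proj, fmt_fc1, fmt_fc2,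
          app_ne (PySem.Int.toStr idx) ".fc1" ".proj" (by decide),
          app_ne (PySem.Int.toStr idx) ".fc2" ".proj" (by decide),
          app_ne (PySem.Int.toStr idx) ".fc2" ".fc1" (by decide)]
  · simp [aux_prefixes, aux_prefixes_alt, auxLoopA, auxMapping_eq, PySem.Dict.getD,
          List.foldl, PySem.Dict.get?, fmt_proj, fmt_fc1, fmt_fc2,
          app_ne (PySem.Int.toStr idx) ".fc1" ".proj" (by decide),
          app_ne (PySem.Int.toStr idx) ".fc2" ".proj" (by decide),
          app_ne (PySem.Int.toStr idx) ".fc2" ".fc1" (by decide),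
          Ne.symm h1, Ne.symm h2, Ne.symm h3]

-- ===== VERDICT (by name: the statement is the Claim_ definition above) =====
theorem aux_prefixes_spec : Claim_equal_aux_prefixes := by
  intro idx target _
  exact aux_prefixes_spec' idx target
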